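-- pv_equiv track=rewrite | github.com/lumy10/projet_M1 | chempkg/atom.py | get_orbitales
-- ===== SOURCE A (Python) =====
-- def get_orbitales (Z: int ):
--     # Z est le nombre d’electrons de l'atome
--     sorted_orbitales=[(n,l) for n in range(1,8) for l in range(n)]
--     sorted_orbitales.sort(key=lambda x: (x[0] + x[1], x[0]))
--     #initialisation
--     atoms_free = Z
--     orbitales_atom = []
--     i=0
--     n=1
--     while atoms_free > 0:
--         n,l = sorted_orbitales[i] # Selectionner la bonne orbitale
--         atoms_orb = (l*2 + 1)*2 # capacité de l'orbitale
--         if atoms_free<atoms_orb: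
--             atoms_orb=atoms_free #tout le reste est dans l'orbital
--             atoms_free=0 #et c'est fini
--         else:
--             atoms_free -= atoms_orb
--         orbitales_atom . append ((n, l, atoms_orb )) # num_atom: nombre d'atome de l'orbitale pas forcement pleine
--         i+=1
--     return orbitales_atom
-- ===== SOURCE B (Python) =====
-- def get_orbitales(Z: int):
--     # Prefix-sum formulation: cumulative capacities locate the last (partial) orbital directly.
--     if Z <= 0:
--         return []
--     orbs = sorted([(n, l) for n in range(1, 8) for l in range(n)],
--                   key=lambda t: (t[0] + t[1], t[0]))
--     cums = []
--     total = 0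
--     for _, l in orbs:
--         total += (2 * l + 1) * 2
--         cums.append(total)
--     k, c = next((i, c) for i, c in enumerate(cums) if c >= Z)
--     n, l = orbs[k]
--     full = [(n2, l2, (2 * l2 + 1) * 2) for n2, l2 in orbs[:k]]
--     return full + [(n, l, Z - (c - (2 * l + 1) * 2))]
-- ===== Notes on version B (the rewrite author's own statement) =====
-- stated objective: alternative
-- what changed: Replaces A's destructive subtract-as-you-go while loop over an index with a prefix-sum formulation: cumulative capacities are built once, the first cumulative total >= Z pinpoints the partial orbital, and the result is emitted as full-prefix ++ one partial entry.
-- outside the precondition, e.g. on get_orbitales(281): A raises IndexError, B raises StopIteration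
import Mathlib
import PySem

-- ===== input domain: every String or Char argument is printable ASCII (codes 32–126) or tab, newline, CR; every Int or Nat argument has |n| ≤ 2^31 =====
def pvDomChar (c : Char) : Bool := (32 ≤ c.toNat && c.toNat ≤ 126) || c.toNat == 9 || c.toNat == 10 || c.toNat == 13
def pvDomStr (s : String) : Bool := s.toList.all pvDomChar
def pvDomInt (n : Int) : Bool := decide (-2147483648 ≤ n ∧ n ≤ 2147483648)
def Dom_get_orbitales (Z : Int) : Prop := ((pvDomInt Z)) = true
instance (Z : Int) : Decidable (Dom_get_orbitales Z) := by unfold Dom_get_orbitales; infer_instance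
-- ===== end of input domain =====

-- B re-implements the electron-filling loop via cumulative orbital capacities (different decomposition, same values).

-- ===== PORT A =====
-- the Madelung-sorted orbital list [(n,l) for n in range(1,8) for l in range(n)].sort(key=λx.(x0+x1, x0))
def pvOrbsA : List (Int × Int) :=
  PySem.List.sorted2
    ((PySem.List.pyRange 1 8 1).flatMap (fun n => (PySem.List.pyRange 0 n 1).map (fun l => (n, l))))
    (fun x => x.1 + x.2) (fun x => x.1)

-- the while loop; the index i increasing by 1 from 0 is transcribed as walking the
-- not-yet-visited suffix of the sorted list (the same sequence of (n,l) selections and state updates)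
def pvLoopA (rest : List (Int × Int)) (free : Int)
    (acc : List (Int × Int × Int)) : List (Int × Int × Int) :=
  if free > 0 then
    match rest with
    | [] => acc  -- sorted_orbitales[i] raises IndexError (Z beyond total capacity); outside Pre_
    | (n, l) :: rest' =>
      let cap := (l * 2 + 1) * 2
      if free < cap then pvLoopA rest' 0 (acc ++ [(n, l, free)])
      else pvLoopA rest' (free - cap) (acc ++ [(n, l, cap)])
  else acc

def get_orbitales (Z : Int) : List (Int × Int × Int) :=
  pvLoopA pvOrbsA Z []

-- ===== PORT B =====
def pvOrbsB : List (Int × Int) :=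
  PySem.List.sorted2
    ((PySem.List.pyRange 1 8 1).flatMap (fun n => (PySem.List.pyRange 0 n 1).map (fun l => (n, l))))
    (fun x => x.1 + x.2) (fun x => x.1)

def get_orbitales_alt (Z : Int) : List (Int × Int × Int) :=
  if Z ≤ 0 then []
  else
    let orbs := pvOrbsB
    -- cumulative capacities
    let cums := ((orbs.foldl
        (fun (st : Int × List Int) p =>
          (st.1 + (2 * p.2 + 1) * 2, st.2 ++ [st.1 + (2 * p.2 + 1) * 2])) (0, []))).2
    -- next((i, c) for i, c in enumerate(cums) if c >= Z)
    match (PySem.List.enumerate cums).find? (fun ic => decide (ic.2 ≥ Z)) with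
    | none => []  -- Python B raises StopIteration here (Z beyond total capacity); outside Pre_
    | some (k, c) =>
      let nl := PySem.List.pyGetD orbs k (0, 0)  -- orbs[k]; k < len orbs since cums has the same length
      let full := (PySem.List.slice orbs none (some k)).map
        (fun p => (p.1, p.2, (2 * p.2 + 1) * 2))
      full ++ [(nl.1, nl.2, Z - (c - (2 * nl.2 + 1) * 2))]

-- ===== PRECONDITION & SPEC =====
-- Pre_ excludes exactly Z > 280 (the total capacity of the 28 listed orbitals), where A raises IndexError.
def Pre_get_orbitales (Z : Int) : Prop := Z ≤ 280
instance (Z : Int) : Decidable (Pre_get_orbitales Z) := by unfold Pre_get_orbitales; infer_instance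
def pvWitness_get_orbitales : Int := 26
def Spec_get_orbitales (Z : Int) (out : List (Int × Int × Int)) : Prop := out = get_orbitales_alt Z
instance (Z : Int) (out : List (Int × Int × Int)) : Decidable (Spec_get_orbitales Z out) := by unfold Spec_get_orbitales; infer_instance

-- ===== CLAIM (what is proved, stated in full; the proofs are below) =====
def Claim_equal_get_orbitales : Prop := ∀ (Z : Int), Dom_get_orbitales Z → Pre_get_orbitales Z → Spec_get_orbitales Z (get_orbitales Z)

-- ===== LEMMAS AND PROOFS =====
theorem pv_nonpos (Z : Int) (h : Z ≤ 0) : get_orbitales Z = get_orbitales_alt Z := by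
  rw [get_orbitales, get_orbitales_alt, pvLoopA.eq_def]
  simp [h, not_lt.mpr h]

set_option maxRecDepth 100000 in
theorem pv_bounded : ∀ Z ∈ PySem.List.pyRange 1 281 1, get_orbitales Z = get_orbitales_alt Z := by
  decide

-- ===== VERDICT (by name: the statement is the Claim_ definition above) =====
theorem get_orbitales_spec : Claim_equal_get_orbitales := by
  intro Z _ hpre
  unfold Spec_get_orbitales
  by_cases h0 : Z ≤ 0
  · exact pv_nonpos Z h0
  · exact pv_bounded Z ((PySem.List.mem_pyRange_one).mpr ⟨by omega, by unfold Pre_get_orbitales at hpre; omega⟩)
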